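-- pv_equiv track=rewrite | github.com/Thom315317/RARE_AREA | diagnose_a2p_coverage.py | classify_valency
-- ===== SOURCE A (Python) =====
-- def verbs_with_roles(lf):
--     toks = lf.split()
--     with_agent, with_theme = set(), set()
--     for j in range(len(toks) - 2):
--         if toks[j + 1] == "." and toks[j + 2] in ("agent", "theme"):
--             v = toks[j]
--             if toks[j + 2] == "agent":
--                 with_agent.add(v)
--             elif toks[j + 2] == "theme":
--                 with_theme.add(v)
--     return with_agent, with_theme
--
-- def classify_valency(train):
--     agent_verbs, theme_verbs = set(), set()
--     transitive_example_verbs = set()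
--     for _inp, lf, _cat in train:
--         wa, wt = verbs_with_roles(lf)
--         agent_verbs |= wa
--         theme_verbs |= wt
--         transitive_example_verbs |= (wa & wt)
--     return {
--         "agent": agent_verbs,
--         "theme": theme_verbs,
--         "transitive_example": transitive_example_verbs,
--         "unacc_only": theme_verbs - agent_verbs,
--     }
-- ===== SOURCE B (Python) =====
-- def classify_valency(train):
--     # Stage 1: flatten the corpus into one global event stream (lf_index, verb, role).
--     events = []
--     for i, (_inp, lf, _cat) in enumerate(train):
--         toks = lf.split()
--         for j in range(len(toks) - 2):
--             if toks[j + 1] == "." and toks[j + 2] in ("agent", "theme"):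
--                 events.append((i, toks[j], toks[j + 2]))
--     # Stage 2: verb-keyed index maps: verb -> set of LF indices carrying that role.
--     agent_lfs, theme_lfs = {}, {}
--     for i, v, role in events:
--         m = agent_lfs if role == "agent" else theme_lfs
--         m.setdefault(v, set()).add(i)
--     # Stage 3: derive the answers from the keyed maps; a verb is transitive iff some
--     # agent event's LF index is also a theme LF index of the same verb (same-LF co-occurrence).
--     transitive = set()
--     for i, v, role in events:
--         if role == "agent" and i in theme_lfs.get(v, set()):
--             transitive.add(v)
--     return {
--         "agent": set(agent_lfs),
--         "theme": set(theme_lfs),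
--         "transitive_example": transitive,
--         "unacc_only": {v for v in theme_lfs if v not in agent_lfs},
--     }
-- ===== Notes on version B (the rewrite author's own statement) =====
-- stated objective: alternative
-- what changed: Replaces A's per-LF helper returning two verb sets merged by set algebra (|= and per-LF &) with a staged global pipeline: one pass flattens the corpus into a (lf_index, verb, role) event stream, a second pass builds verb-keyed dicts mapping each verb to the set of LF indices carrying that role, and the four answers are derived from those maps, same-LF transitivity coming from index membership in the verb's theme-LF index set instead of per-LF set intersection.
import Mathlib
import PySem

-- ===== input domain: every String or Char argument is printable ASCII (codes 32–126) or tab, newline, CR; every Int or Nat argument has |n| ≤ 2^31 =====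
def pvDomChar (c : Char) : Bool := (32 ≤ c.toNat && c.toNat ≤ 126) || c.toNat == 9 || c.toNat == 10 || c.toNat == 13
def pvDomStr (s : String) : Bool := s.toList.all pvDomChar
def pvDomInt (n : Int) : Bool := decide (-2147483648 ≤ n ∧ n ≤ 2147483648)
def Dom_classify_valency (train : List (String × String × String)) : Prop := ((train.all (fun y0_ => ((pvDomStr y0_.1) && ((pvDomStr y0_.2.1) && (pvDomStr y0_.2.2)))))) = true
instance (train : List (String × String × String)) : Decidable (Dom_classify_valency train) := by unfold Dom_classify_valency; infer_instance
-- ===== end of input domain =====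

-- B replaces A's per-LF helper and per-LF set algebra (|=, &) by a staged global pipeline:
-- a flat (lf_index, verb, role) event stream, verb-keyed dicts of LF-index sets, and a
-- post-pass deriving the four answers from those maps: alternative decomposition, same cost.

-- ===== PORT A =====
-- helper verbs_with_roles: window loop over j, building the per-LF agent/theme sets
def pvVerbsWithRoles (lf : String) : PySem.Set String × PySem.Set String :=
  let toks := PySem.Str.split₀ lf
  (List.range (toks.length - 2)).foldl
    (fun st j =>
      if toks.getD (j + 1) "" = "." ∧
          (toks.getD (j + 2) "" = "agent" ∨ toks.getD (j + 2) "" = "theme") then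
        let v := toks.getD j ""
        if toks.getD (j + 2) "" = "agent" then (PySem.Set.add st.1 v, st.2)
        else if toks.getD (j + 2) "" = "theme" then (st.1, PySem.Set.add st.2 v)
        else st
      else st)
    ((PySem.Set.empty : PySem.Set String), (PySem.Set.empty : PySem.Set String))

def classify_valency (train : List (String × String × String)) : List (String × List String) :=
  let fin := train.foldl
    (fun st t =>
      let wr := pvVerbsWithRoles t.2.1
      (PySem.Set.union st.1 wr.1, PySem.Set.union st.2.1 wr.2,
       PySem.Set.union st.2.2 (PySem.Set.inter wr.1 wr.2)))
    ((PySem.Set.empty : PySem.Set String), (PySem.Set.empty : PySem.Set String),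
     (PySem.Set.empty : PySem.Set String))
  [("agent", fin.1), ("theme", fin.2.1), ("transitive_example", fin.2.2),
   ("unacc_only", PySem.Set.diff fin.2.1 fin.1)]

-- ===== PORT B =====
def classify_valency_alt (train : List (String × String × String)) : List (String × List String) :=
  -- stage 1: one global (lf_index, verb, role) event stream over the whole corpus
  let events := (PySem.List.enumerate train).foldl
    (fun acc it =>
      let toks := PySem.Str.split₀ it.2.2.1
      (List.range (toks.length - 2)).foldl
        (fun acc2 j =>
          if toks.getD (j + 1) "" = "." ∧
              (toks.getD (j + 2) "" = "agent" ∨ toks.getD (j + 2) "" = "theme") then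
            acc2 ++ [(it.1, toks.getD j "", toks.getD (j + 2) "")]
          else acc2)
        acc)
    []
  -- stage 2: verb-keyed index maps: verb -> set of LF indices carrying that role
  let maps := events.foldl
    (fun (m : PySem.Dict String (PySem.Set Int) × PySem.Dict String (PySem.Set Int)) e =>
      if e.2.2 = "agent" then
        (m.1.insert e.2.1 (PySem.Set.add (m.1.getD e.2.1 PySem.Set.empty) e.1), m.2)
      else
        (m.1, m.2.insert e.2.1 (PySem.Set.add (m.2.getD e.2.1 PySem.Set.empty) e.1)))
    (PySem.Dict.empty, PySem.Dict.empty)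
  -- stage 3: transitive = an agent event whose LF index is a theme LF index of the same verb
  let transitive := events.foldl
    (fun s e =>
      if e.2.2 = "agent" ∧ PySem.Set.contains (maps.2.getD e.2.1 PySem.Set.empty) e.1 = true then
        PySem.Set.add s e.2.1
      else s)
    (PySem.Set.empty : PySem.Set String)
  [("agent", PySem.Set.ofList maps.1.keys),
   ("theme", PySem.Set.ofList maps.2.keys),
   ("transitive_example", transitive),
   ("unacc_only", PySem.Set.ofList (maps.2.keys.filter (fun v => !(maps.1.contains v))))]

-- ===== PRECONDITION & SPEC =====
def Spec_classify_valency (train : List (String × String × String)) (out : List (String × List String)) : Prop := out = classify_valency_alt train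
instance (train : List (String × String × String)) (out : List (String × List String)) : Decidable (Spec_classify_valency train out) := by unfold Spec_classify_valency; infer_instance

-- ===== CLAIM (what is proved, stated in full; the proofs are below) =====
def Claim_equal_classify_valency : Prop := ∀ (train : List (String × String × String)), Dom_classify_valency train → Spec_classify_valency train (classify_valency train)

-- ===== LEMMAS AND PROOFS =====

-- tokens of the logical form of a training triple
def pvToks (t : String × String × String) : List String := PySem.Str.split₀ t.2.1

-- per-window extraction of A, as partial functions over the window index
def pvFa (toks : List String) (j : Nat) : Option String :=
  if toks.getD (j + 1) "" = "." ∧ toks.getD (j + 2) "" = "agent" then some (toks.getD j "") else none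
def pvFb (toks : List String) (j : Nat) : Option String :=
  if toks.getD (j + 1) "" = "." ∧ toks.getD (j + 2) "" = "theme" then some (toks.getD j "") else none

-- per-LF agent / theme verb occurrence lists (in window order)
def pvLa (t : String × String × String) : List String :=
  (List.range ((pvToks t).length - 2)).filterMap (pvFa (pvToks t))
def pvLt (t : String × String × String) : List String :=
  (List.range ((pvToks t).length - 2)).filterMap (pvFb (pvToks t))

-- per-LF event list of B (lf index i, verb, role)
def pvEv (i : Int) (t : String × String × String) : List (Int × String × String) :=
  ((List.range ((pvToks t).length - 2)).filter (fun j =>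
      decide ((pvToks t).getD (j + 1) "" = "." ∧
        ((pvToks t).getD (j + 2) "" = "agent" ∨ (pvToks t).getD (j + 2) "" = "theme")))).map
    (fun j => (i, (pvToks t).getD j "", (pvToks t).getD (j + 2) ""))

def pvEvents (train : List (String × String × String)) : List (Int × String × String) :=
  (PySem.List.enumerate train).flatMap (fun it => pvEv it.1 it.2)

def pvAgentEvents (train : List (String × String × String)) : List (Int × String × String) :=
  (pvEvents train).filter (fun e => decide (e.2.2 = "agent"))
def pvThemeEvents (train : List (String × String × String)) : List (Int × String × String) :=
  (pvEvents train).filter (fun e => decide (e.2.2 = "theme"))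

def pvDictStep (d : PySem.Dict String (PySem.Set Int)) (e : Int × String × String) :
    PySem.Dict String (PySem.Set Int) :=
  d.insert e.2.1 (PySem.Set.add (d.getD e.2.1 PySem.Set.empty) e.1)

def pvAgentDict (train : List (String × String × String)) : PySem.Dict String (PySem.Set Int) :=
  (pvAgentEvents train).foldl pvDictStep PySem.Dict.empty
def pvThemeDict (train : List (String × String × String)) : PySem.Dict String (PySem.Set Int) :=
  (pvThemeEvents train).foldl pvDictStep PySem.Dict.empty

-- the common normal form both programs are reduced to
def pvNF (train : List (String × String × String)) : List (String × List String) :=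
  [("agent", PySem.Set.ofList (train.flatMap pvLa)),
   ("theme", PySem.Set.ofList (train.flatMap pvLt)),
   ("transitive_example", PySem.Set.ofList (train.flatMap (fun t =>
       (pvLa t).filter (fun v => PySem.Set.contains (PySem.Set.ofList (pvLt t)) v)))),
   ("unacc_only", PySem.Set.diff (PySem.Set.ofList (train.flatMap pvLt))
       (PySem.Set.ofList (train.flatMap pvLa)))]

theorem pv_filter_map_filterMap {α β : Type} (p : α → Bool) (g : α → β) (l : List α) :
    (l.filter p).map g = l.filterMap (fun x => if p x then some (g x) else none) := by
  induction l with
  | nil => rfl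
  | cons x xs ih => cases hx : p x <;> simp only [List.filter_cons, List.filterMap_cons, hx, Bool.false_eq_true, if_false, if_true] <;> simp [ih]

theorem pv_and_true {a b : Bool} (ha : a = true) (hb : b = true) : (a && b) = true := by
  rw [ha, hb]; rfl

theorem pv_and_left {a b : Bool} (h : (a && b) = true) : a = true := by
  cases a <;> simp_all

theorem pv_and_right {a b : Bool} (h : (a && b) = true) : b = true := by
  cases b <;> simp_all

theorem pvVR_fold (toks : List String) (js : List Nat) (sa sb : PySem.Set String) :
    js.foldl
      (fun st j =>
        if toks.getD (j + 1) "" = "." ∧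
            (toks.getD (j + 2) "" = "agent" ∨ toks.getD (j + 2) "" = "theme") then
          let v := toks.getD j ""
          if toks.getD (j + 2) "" = "agent" then (PySem.Set.add st.1 v, st.2)
          else if toks.getD (j + 2) "" = "theme" then (st.1, PySem.Set.add st.2 v)
          else st
        else st)
      (sa, sb)
    = (PySem.Set.update sa (js.filterMap (pvFa toks)), PySem.Set.update sb (js.filterMap (pvFb toks))) := by
  induction js generalizing sa sb with
  | nil => rfl
  | cons j rest ih =>
    rw [List.foldl_cons]
    by_cases hdot : toks.getD (j + 1) "" = "."
    · by_cases hag : toks.getD (j + 2) "" = "agent"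
      · have hfa : pvFa toks j = some (toks.getD j "") := by
          rw [pvFa, if_pos ⟨hdot, hag⟩]
        have hfb : pvFb toks j = none := by
          rw [pvFb, if_neg]
          rintro ⟨-, h⟩
          rw [hag] at h
          exact absurd h (by decide)
        have hc : toks.getD (j + 1) "" = "." ∧
            (toks.getD (j + 2) "" = "agent" ∨ toks.getD (j + 2) "" = "theme") := ⟨hdot, Or.inl hag⟩
        rw [List.filterMap_cons_some hfa, List.filterMap_cons_none hfb]
        simp only [if_pos hc, if_pos hag]
        rw [ih, PySem.Set.update_cons]
      · by_cases hth : toks.getD (j + 2) "" = "theme"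
        · have hfa : pvFa toks j = none := by
            rw [pvFa, if_neg]
            rintro ⟨-, h⟩
            exact hag h
          have hfb : pvFb toks j = some (toks.getD j "") := by
            rw [pvFb, if_pos ⟨hdot, hth⟩]
          have hc : toks.getD (j + 1) "" = "." ∧
              (toks.getD (j + 2) "" = "agent" ∨ toks.getD (j + 2) "" = "theme") := ⟨hdot, Or.inr hth⟩
          rw [List.filterMap_cons_none hfa, List.filterMap_cons_some hfb]
          simp only [if_pos hc, if_neg hag, if_pos hth]
          rw [ih, PySem.Set.update_cons]
        · have hfa : pvFa toks j = none := by
            rw [pvFa, if_neg]; rintro ⟨-, h⟩; exact hag h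
          have hfb : pvFb toks j = none := by
            rw [pvFb, if_neg]; rintro ⟨-, h⟩; exact hth h
          have hc : ¬(toks.getD (j + 1) "" = "." ∧
              (toks.getD (j + 2) "" = "agent" ∨ toks.getD (j + 2) "" = "theme")) := by
            rintro ⟨-, h | h⟩
            exacts [hag h, hth h]
          rw [List.filterMap_cons_none hfa, List.filterMap_cons_none hfb]
          simp only [if_neg hc]
          exact ih sa sb
    · have hfa : pvFa toks j = none := by
        rw [pvFa, if_neg]; rintro ⟨h, -⟩; exact hdot h
      have hfb : pvFb toks j = none := by
        rw [pvFb, if_neg]; rintro ⟨h, -⟩; exact hdot h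
      have hc : ¬(toks.getD (j + 1) "" = "." ∧
          (toks.getD (j + 2) "" = "agent" ∨ toks.getD (j + 2) "" = "theme")) := by
        rintro ⟨h, -⟩; exact hdot h
      rw [List.filterMap_cons_none hfa, List.filterMap_cons_none hfb]
      simp only [if_neg hc]
      exact ih sa sb

theorem pvVR_eq (t : String × String × String) :
    pvVerbsWithRoles t.2.1 = (PySem.Set.ofList (pvLa t), PySem.Set.ofList (pvLt t)) := by
  unfold pvVerbsWithRoles pvLa pvLt pvToks
  rw [pvVR_fold]
  rfl

-- updating with set(l) is the same as updating with l
theorem pv_update_ofList {α : Type} [BEq α] [LawfulBEq α] (s : PySem.Set α) (l : List α) :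
    PySem.Set.update s (PySem.Set.ofList l) = PySem.Set.update s l := by
  induction l using List.reverseRecOn with
  | nil => rfl
  | append_singleton l x ih =>
    rw [PySem.Set.ofList_append_singleton, PySem.Set.update_append,
        PySem.Set.update_cons, PySem.Set.update_nil]
    by_cases hx : x ∈ PySem.Set.ofList l
    · rw [PySem.Set.add_of_mem hx, ih, PySem.Set.add_of_mem]
      exact (PySem.Set.mem_update _ _ _).2 (Or.inr ((PySem.Set.mem_ofList _ _).1 hx))
    · rw [PySem.Set.add_of_not_mem hx, PySem.Set.update_append, PySem.Set.update_cons,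
          PySem.Set.update_nil, ih]

-- filtering set(l) is set(filter l)
theorem pv_filter_ofList {α : Type} [BEq α] [LawfulBEq α] (p : α → Bool) (l : List α) :
    (PySem.Set.ofList l).filter p = PySem.Set.ofList (l.filter p) := by
  induction l using List.reverseRecOn with
  | nil => rfl
  | append_singleton l x ih =>
    rw [PySem.Set.ofList_append_singleton, List.filter_append]
    by_cases hx : x ∈ PySem.Set.ofList l
    · rw [PySem.Set.add_of_mem hx]
      by_cases hp : p x
      · simp only [List.filter_cons, hp, if_true, List.filter_nil,
          PySem.Set.ofList_append_singleton, ih]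
        rw [PySem.Set.add_of_mem]
        rw [← ih]
        exact List.mem_filter.2 ⟨hx, hp⟩
      · simp [hp, ih]
    · rw [PySem.Set.add_of_not_mem hx, List.filter_append]
      by_cases hp : p x
      · simp only [List.filter_cons, hp, if_true, List.filter_nil,
          PySem.Set.ofList_append_singleton, ih]
        rw [PySem.Set.add_of_not_mem]
        intro hmem
        exact hx ((PySem.Set.mem_ofList _ _).2 (List.mem_filter.1 ((PySem.Set.mem_ofList _ _).1 hmem)).1)
      · simp [hp, ih]

-- a triple of independent set-update accumulators over one loop
theorem pv_foldl_triple {T : Type} (g1 g2 g3 : T → List String) (l : List T)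
    (s1 s2 s3 : PySem.Set String) :
    l.foldl (fun st t => (PySem.Set.update st.1 (g1 t), PySem.Set.update st.2.1 (g2 t),
        PySem.Set.update st.2.2 (g3 t))) (s1, s2, s3)
    = (PySem.Set.update s1 (l.flatMap g1), PySem.Set.update s2 (l.flatMap g2),
       PySem.Set.update s3 (l.flatMap g3)) := by
  induction l generalizing s1 s2 s3 with
  | nil => simp [PySem.Set.update_nil]
  | cons t rest ih => simp [List.flatMap_cons, PySem.Set.update_append, ih]

-- A reduced to the normal form
theorem pvA_eq (train : List (String × String × String)) : classify_valency train = pvNF train := by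
  unfold classify_valency pvNF
  have hstep : (fun (st : PySem.Set String × PySem.Set String × PySem.Set String) t =>
      let wr := pvVerbsWithRoles t.2.1
      (PySem.Set.union st.1 wr.1, PySem.Set.union st.2.1 wr.2,
       PySem.Set.union st.2.2 (PySem.Set.inter wr.1 wr.2)))
      = (fun st t => (PySem.Set.update st.1 (pvLa t), PySem.Set.update st.2.1 (pvLt t),
          PySem.Set.update st.2.2 ((pvLa t).filter
            (fun v => PySem.Set.contains (PySem.Set.ofList (pvLt t)) v)))) := by
    funext st t
    simp only [pvVR_eq]
    show (PySem.Set.update st.1 (PySem.Set.ofList (pvLa t)),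
          PySem.Set.update st.2.1 (PySem.Set.ofList (pvLt t)),
          PySem.Set.update st.2.2 ((PySem.Set.ofList (pvLa t)).filter
            (fun v => PySem.Set.contains (PySem.Set.ofList (pvLt t)) v))) = _
    rw [pv_update_ofList, pv_update_ofList, pv_filter_ofList, pv_update_ofList]
  rw [hstep]
  rw [show (PySem.Set.empty : PySem.Set String) = ([] : List String) from rfl]
  rw [pv_foldl_triple]
  simp only [PySem.Set.update_nil_left]

-- every event of one LF carries that LF's index
theorem pv_ev_first (i : Int) (t : String × String × String) :
    ∀ e ∈ pvEv i t, e.1 = i := by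
  intro e he
  rcases List.mem_map.1 he with ⟨j, -, rfl⟩
  rfl

-- every event's role is agent or theme
theorem pv_ev_role (i : Int) (t : String × String × String) :
    ∀ e ∈ pvEv i t, e.2.2 = "agent" ∨ e.2.2 = "theme" := by
  intro e he
  rcases List.mem_map.1 he with ⟨j, hj, rfl⟩
  exact (of_decide_eq_true (List.mem_filter.1 hj).2).2

theorem pv_events_role (train : List (String × String × String)) :
    ∀ e ∈ pvEvents train, e.2.2 = "agent" ∨ e.2.2 = "theme" := by
  intro e he
  rcases List.mem_flatMap.1 he with ⟨it, -, hev⟩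
  exact pv_ev_role it.1 it.2 e hev

-- the agent projection of one LF's agent events is its agent verb list
theorem pv_ev_agent (i : Int) (t : String × String × String) :
    ((pvEv i t).filter (fun e => decide (e.2.2 = "agent"))).map (fun e => e.2.1) = pvLa t := by
  unfold pvEv pvLa
  rw [List.filter_map, List.map_map, List.filter_filter, pv_filter_map_filterMap]
  apply List.filterMap_congr
  intro j _
  simp only [Function.comp_apply]
  rw [pvFa]
  by_cases hdot : (pvToks t).getD (j + 1) "" = "."
  · by_cases hag : (pvToks t).getD (j + 2) "" = "agent"
    · rw [if_pos (pv_and_true (decide_eq_true hag) (decide_eq_true ⟨hdot, Or.inl hag⟩)),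
        if_pos ⟨hdot, hag⟩]
    · rw [if_neg (fun hcon => hag (of_decide_eq_true (pv_and_left hcon))),
        if_neg (fun hc => hag hc.2)]
  · rw [if_neg (fun hcon => hdot (of_decide_eq_true (pv_and_right hcon)).1),
      if_neg (fun hc => hdot hc.1)]

theorem pv_ev_theme (i : Int) (t : String × String × String) :
    ((pvEv i t).filter (fun e => decide (e.2.2 = "theme"))).map (fun e => e.2.1) = pvLt t := by
  unfold pvEv pvLt
  rw [List.filter_map, List.map_map, List.filter_filter, pv_filter_map_filterMap]
  apply List.filterMap_congr
  intro j _
  simp only [Function.comp_apply]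
  rw [pvFb]
  by_cases hdot : (pvToks t).getD (j + 1) "" = "."
  · by_cases hth : (pvToks t).getD (j + 2) "" = "theme"
    · rw [if_pos (pv_and_true (decide_eq_true hth) (decide_eq_true ⟨hdot, Or.inr hth⟩)),
        if_pos ⟨hdot, hth⟩]
    · rw [if_neg (fun hcon => hth (of_decide_eq_true (pv_and_left hcon))),
        if_neg (fun hc => hth hc.2)]
  · rw [if_neg (fun hcon => hdot (of_decide_eq_true (pv_and_right hcon)).1),
      if_neg (fun hc => hdot hc.1)]

-- an agent event filtered by the theme-index test projects to the filtered agent verb list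
theorem pv_trans_list (train : List (String × String × String)) (i : Int) (t : String × String × String) :
    ((pvEv i t).filter (fun e => decide (e.2.2 = "agent" ∧
        PySem.Set.contains ((pvThemeDict train).getD e.2.1 PySem.Set.empty) e.1 = true))).map
      (fun e => e.2.1)
    = (pvLa t).filter (fun v =>
        PySem.Set.contains ((pvThemeDict train).getD v PySem.Set.empty) i) := by
  have h1 : ((pvEv i t).filter (fun e => decide (e.2.2 = "agent" ∧
        PySem.Set.contains ((pvThemeDict train).getD e.2.1 PySem.Set.empty) e.1 = true)))
      = ((pvEv i t).filter (fun e => decide (e.2.2 = "agent"))).filter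
          (fun e => PySem.Set.contains ((pvThemeDict train).getD e.2.1 PySem.Set.empty) i) := by
    rw [List.filter_filter]
    apply List.filter_congr
    intro e he
    rw [show e.1 = i from pv_ev_first i t e he]
    cases hq : PySem.Set.contains ((pvThemeDict train).getD e.2.1 PySem.Set.empty) i <;>
      by_cases hag : e.2.2 = "agent" <;> simp [hag, hq]
  rw [h1]
  rw [show (fun (e : Int × String × String) =>
        PySem.Set.contains ((pvThemeDict train).getD e.2.1 PySem.Set.empty) i)
      = (fun v => PySem.Set.contains ((pvThemeDict train).getD v PySem.Set.empty) i) ∘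
        (fun (e : Int × String × String) => e.2.1) from rfl]
  rw [← List.filter_map, pv_ev_agent]

-- flatMap over enumerate only through the element is flatMap over the list
theorem pv_flatMap_enum {β : Type} (train : List (String × String × String))
    (h : String × String × String → List β) :
    (PySem.List.enumerate train).flatMap (fun it => h it.2) = train.flatMap h := by
  rw [PySem.List.enumerate_eq_zipIdx_map, List.flatMap_map]
  conv_rhs => rw [← List.zipIdx_map_fst 0 train, List.flatMap_map]

-- membership in enumerate
theorem pv_enum_mem (i : Int) (t : String × String × String)
    (train : List (String × String × String)) :
    (i, t) ∈ PySem.List.enumerate train ↔ ∃ k : Nat, train[k]? = some t ∧ i = (k : Int) := by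
  rw [PySem.List.enumerate_eq_zipIdx_map, List.mem_map]
  constructor
  · rintro ⟨⟨a, k⟩, hk, heq⟩
    obtain ⟨h1, h2⟩ := Prod.mk.injEq .. ▸ heq
    refine ⟨k, ?_, ?_⟩
    · rw [← h2]; exact List.mk_mem_zipIdx_iff_getElem?.1 hk
    · omega
  · rintro ⟨k, hk, rfl⟩
    exact ⟨(t, k), List.mk_mem_zipIdx_iff_getElem?.2 hk, by simp⟩

theorem pv_enum_inj (i : Int) (t t' : String × String × String)
    (train : List (String × String × String))
    (h : (i, t) ∈ PySem.List.enumerate train) (h' : (i, t') ∈ PySem.List.enumerate train) :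
    t = t' := by
  rcases (pv_enum_mem i t train).1 h with ⟨k, hk, hik⟩
  rcases (pv_enum_mem i t' train).1 h' with ⟨k', hk', hik'⟩
  have : k = k' := by omega
  subst this
  rw [hk] at hk'
  exact Option.some.injEq .. ▸ hk'.symm ▸ rfl

-- membership in the set stored under a key after the dict-building loop
theorem pv_mem_getD_fold (l : List (Int × String × String))
    (d : PySem.Dict String (PySem.Set Int)) (c : String) (x : Int) :
    x ∈ (l.foldl pvDictStep d).getD c PySem.Set.empty ↔
      x ∈ d.getD c PySem.Set.empty ∨ ∃ e ∈ l, e.2.1 = c ∧ e.1 = x := by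
  induction l generalizing d with
  | nil => simp
  | cons e rest ih =>
    rw [List.foldl_cons, ih]
    unfold pvDictStep
    rw [PySem.Dict.getD_insert]
    by_cases hc : c = e.2.1
    · subst hc
      rw [if_pos rfl]
      simp only [PySem.Set.mem_add]
      constructor
      · rintro ((h | h) | ⟨e', he', h1, h2⟩)
        · exact Or.inl h
        · exact Or.inr ⟨e, List.mem_cons_self, rfl, h.symm⟩
        · exact Or.inr ⟨e', List.mem_cons.2 (Or.inr he'), h1, h2⟩
      · rintro (h | ⟨e', he', h1, h2⟩)
        · exact Or.inl (Or.inl h)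
        · rcases List.mem_cons.1 he' with rfl | hmem
          · exact Or.inl (Or.inr h2.symm)
          · exact Or.inr ⟨e', hmem, h1, h2⟩
    · rw [if_neg hc]
      constructor
      · rintro (h | ⟨e', he', h1, h2⟩)
        · exact Or.inl h
        · exact Or.inr ⟨e', List.mem_cons.2 (Or.inr he'), h1, h2⟩
      · rintro (h | ⟨e', he', h1, h2⟩)
        · exact Or.inl h
        · rcases List.mem_cons.1 he' with rfl | hmem
          · exact absurd h1 (fun hh => hc hh.symm)
          · exact Or.inr ⟨e', hmem, h1, h2⟩

theorem pv_mem_themeDict (train : List (String × String × String)) (c : String) (x : Int) :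
    x ∈ (pvThemeDict train).getD c PySem.Set.empty ↔
      ∃ e ∈ pvThemeEvents train, e.2.1 = c ∧ e.1 = x := by
  unfold pvThemeDict
  rw [pv_mem_getD_fold]
  simp [PySem.Dict.getD_empty, PySem.Set.empty]

-- a theme event of a given LF is a theme verb occurrence there
theorem pv_mem_pvEv_theme (i : Int) (t : String × String × String) (v : String) :
    (i, v, "theme") ∈ pvEv i t ↔ v ∈ pvLt t := by
  unfold pvEv pvLt
  constructor
  · intro h
    rcases List.mem_map.1 h with ⟨j, hj, heq⟩
    obtain ⟨hjr, hjc⟩ := List.mem_filter.1 hj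
    have hv : (pvToks t).getD j "" = v := congrArg (fun p => p.2.1) heq
    have hth : (pvToks t).getD (j + 2) "" = "theme" := congrArg (fun p => p.2.2) heq
    have hdot : (pvToks t).getD (j + 1) "" = "." := (of_decide_eq_true hjc).1
    exact List.mem_filterMap.2 ⟨j, hjr, by rw [pvFb, if_pos ⟨hdot, hth⟩, hv]⟩
  · intro h
    rcases List.mem_filterMap.1 h with ⟨j, hjr, hjv⟩
    rw [pvFb] at hjv
    by_cases hc : (pvToks t).getD (j + 1) "" = "." ∧ (pvToks t).getD (j + 2) "" = "theme"
    · rw [if_pos hc] at hjv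
      refine List.mem_map.2 ⟨j, List.mem_filter.2 ⟨hjr, ?_⟩, ?_⟩
      · exact decide_eq_true ⟨hc.1, Or.inr hc.2⟩
      · rw [Option.some.injEq] at hjv
        rw [hjv, hc.2]
    · rw [if_neg hc] at hjv
      exact absurd hjv (by simp)

-- the key equivalence: an LF index is a theme index of v iff v is a theme verb of that LF
theorem pv_key_equiv (train : List (String × String × String)) (i : Int)
    (t : String × String × String) (hmem : (i, t) ∈ PySem.List.enumerate train) (v : String) :
    PySem.Set.contains ((pvThemeDict train).getD v PySem.Set.empty) i
      = PySem.Set.contains (PySem.Set.ofList (pvLt t)) v := by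
  rw [Bool.eq_iff_iff, PySem.Set.contains_iff, PySem.Set.contains_iff, PySem.Set.mem_ofList,
    pv_mem_themeDict]
  constructor
  · rintro ⟨e, he, hev, hei⟩
    obtain ⟨heflat, herole⟩ := List.mem_filter.1 he
    rcases List.mem_flatMap.1 heflat with ⟨it, hit, hin⟩
    have h1 : e.1 = it.1 := pv_ev_first it.1 it.2 e hin
    have hrole : e.2.2 = "theme" := of_decide_eq_true herole
    have hit1 : it.1 = i := by rw [← h1, hei]
    have hit' : (i, it.2) ∈ PySem.List.enumerate train := by
      rw [← hit1]
      exact (Prod.mk.eta (p := it)) ▸ hit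
    have ht : it.2 = t := pv_enum_inj i it.2 t train hit' hmem
    have he' : e = (i, v, "theme") := by
      rcases e with ⟨e1, e2, e3⟩
      simp only at h1 hev hrole hei
      rw [hev, hrole, hei]
    rw [he', ht, hit1] at hin
    exact (pv_mem_pvEv_theme i t v).1 hin
  · intro hv
    refine ⟨(i, v, "theme"), ?_, rfl, rfl⟩
    refine List.mem_filter.2 ⟨?_, decide_eq_true rfl⟩
    exact List.mem_flatMap.2 ⟨(i, t), hmem, (pv_mem_pvEv_theme i t v).2 hv⟩

-- keys of the two dicts are the global agent / theme verb sets
theorem pv_agent_list (train : List (String × String × String)) :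
    (pvAgentEvents train).map (fun e => e.2.1) = train.flatMap pvLa := by
  unfold pvAgentEvents pvEvents
  rw [List.filter_flatMap, List.map_flatMap]
  rw [List.flatMap_congr (g := fun it => pvLa it.2) (fun it _ => pv_ev_agent it.1 it.2)]
  exact pv_flatMap_enum train pvLa

theorem pv_theme_list (train : List (String × String × String)) :
    (pvThemeEvents train).map (fun e => e.2.1) = train.flatMap pvLt := by
  unfold pvThemeEvents pvEvents
  rw [List.filter_flatMap, List.map_flatMap]
  rw [List.flatMap_congr (g := fun it => pvLt it.2) (fun it _ => pv_ev_theme it.1 it.2)]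
  exact pv_flatMap_enum train pvLt

theorem pv_agentDict_keys (train : List (String × String × String)) :
    (pvAgentDict train).keys = PySem.Set.ofList (train.flatMap pvLa) := by
  unfold pvAgentDict pvDictStep
  rw [PySem.Dict.keys_foldl_insert_key (pvAgentEvents train) (fun e => e.2.1)
    (fun d e => PySem.Set.add (d.getD e.2.1 PySem.Set.empty) e.1) PySem.Dict.empty]
  rw [PySem.Dict.keys_empty, PySem.Set.update_nil_left, pv_agent_list]

theorem pv_themeDict_keys (train : List (String × String × String)) :
    (pvThemeDict train).keys = PySem.Set.ofList (train.flatMap pvLt) := by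
  unfold pvThemeDict pvDictStep
  rw [PySem.Dict.keys_foldl_insert_key (pvThemeEvents train) (fun e => e.2.1)
    (fun d e => PySem.Set.add (d.getD e.2.1 PySem.Set.empty) e.1) PySem.Dict.empty]
  rw [PySem.Dict.keys_empty, PySem.Set.update_nil_left, pv_theme_list]

-- B reduced to the normal form
theorem pvB_eq (train : List (String × String × String)) : classify_valency_alt train = pvNF train := by
  unfold classify_valency_alt
  -- stage 1 is the event stream
  have hev : ((PySem.List.enumerate train).foldl
      (fun acc it =>
        let toks := PySem.Str.split₀ it.2.2.1
        (List.range (toks.length - 2)).foldl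
          (fun acc2 j =>
            if toks.getD (j + 1) "" = "." ∧
                (toks.getD (j + 2) "" = "agent" ∨ toks.getD (j + 2) "" = "theme") then
              acc2 ++ [(it.1, toks.getD j "", toks.getD (j + 2) "")]
            else acc2)
          acc)
      ([] : List (Int × String × String))) = pvEvents train := by
    have hinner : (fun (acc : List (Int × String × String)) (it : Int × (String × String × String)) =>
        let toks := PySem.Str.split₀ it.2.2.1
        (List.range (toks.length - 2)).foldl
          (fun acc2 j =>
            if toks.getD (j + 1) "" = "." ∧
                (toks.getD (j + 2) "" = "agent" ∨ toks.getD (j + 2) "" = "theme") then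
              acc2 ++ [(it.1, toks.getD j "", toks.getD (j + 2) "")]
            else acc2)
          acc)
        = (fun acc it => acc ++ pvEv it.1 it.2) := by
      funext acc it
      exact PySem.List.foldl_append_ite
        (p := fun j => (pvToks it.2).getD (j + 1) "" = "." ∧
          ((pvToks it.2).getD (j + 2) "" = "agent" ∨ (pvToks it.2).getD (j + 2) "" = "theme"))
        (f := fun j => (it.1, (pvToks it.2).getD j "", (pvToks it.2).getD (j + 2) "")) _ _
    rw [hinner, PySem.List.foldl_append_eq_flatMap]
    rfl
  rw [hev]
  -- stage 2 is the two dicts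
  have hmaps : (pvEvents train).foldl
      (fun (m : PySem.Dict String (PySem.Set Int) × PySem.Dict String (PySem.Set Int)) e =>
        if e.2.2 = "agent" then
          (m.1.insert e.2.1 (PySem.Set.add (m.1.getD e.2.1 PySem.Set.empty) e.1), m.2)
        else
          (m.1, m.2.insert e.2.1 (PySem.Set.add (m.2.getD e.2.1 PySem.Set.empty) e.1)))
      (PySem.Dict.empty, PySem.Dict.empty)
      = (pvAgentDict train, pvThemeDict train) := by
    have hsplit : (fun (m : PySem.Dict String (PySem.Set Int) × PySem.Dict String (PySem.Set Int)) (e : Int × String × String) =>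
        if e.2.2 = "agent" then
          (m.1.insert e.2.1 (PySem.Set.add (m.1.getD e.2.1 PySem.Set.empty) e.1), m.2)
        else
          (m.1, m.2.insert e.2.1 (PySem.Set.add (m.2.getD e.2.1 PySem.Set.empty) e.1)))
        = (fun m e =>
            (if e.2.2 = "agent" then pvDictStep m.1 e else m.1,
             if ¬(e.2.2 = "agent") then pvDictStep m.2 e else m.2)) := by
      funext m e
      by_cases h : e.2.2 = "agent" <;> simp [h, pvDictStep]
    rw [hsplit, PySem.List.foldl_prod_mk
      (fun d (e : Int × String × String) => if e.2.2 = "agent" then pvDictStep d e else d)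
      (fun d (e : Int × String × String) => if ¬(e.2.2 = "agent") then pvDictStep d e else d)
      (pvEvents train) PySem.Dict.empty PySem.Dict.empty]
    rw [PySem.List.foldl_ite_eq_foldl_filter (p := fun (e : Int × String × String) => e.2.2 = "agent") pvDictStep]
    rw [PySem.List.foldl_ite_eq_foldl_filter (p := fun (e : Int × String × String) => ¬(e.2.2 = "agent")) pvDictStep]
    have hth : (pvEvents train).filter (fun e => decide ¬(e.2.2 = "agent"))
        = pvThemeEvents train := by
      unfold pvThemeEvents
      apply List.filter_congr
      intro e he
      rcases pv_events_role train e he with h | h <;> simp [h]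
    rw [hth]
    rfl
  simp only []
  rw [hmaps]
  simp only []
  -- stage 3 and the answers
  rw [PySem.List.foldl_ite_eq_foldl_filter
    (p := fun (e : Int × String × String) => e.2.2 = "agent" ∧
      PySem.Set.contains ((pvThemeDict train).getD e.2.1 PySem.Set.empty) e.1 = true)
    (fun s e => PySem.Set.add s e.2.1)]
  rw [← PySem.Set.update_map_eq_foldl_add _ (fun (e : Int × String × String) => e.2.1)]
  rw [show (PySem.Set.empty : PySem.Set String) = ([] : List String) from rfl,
    PySem.Set.update_nil_left]
  have htrans : ((pvEvents train).filter (fun e => decide (e.2.2 = "agent" ∧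
        PySem.Set.contains ((pvThemeDict train).getD e.2.1 PySem.Set.empty) e.1 = true))).map
      (fun (e : Int × String × String) => e.2.1)
      = train.flatMap (fun t => (pvLa t).filter
          (fun v => PySem.Set.contains (PySem.Set.ofList (pvLt t)) v)) := by
    unfold pvEvents
    rw [List.filter_flatMap, List.map_flatMap]
    rw [List.flatMap_congr (g := fun it => (pvLa it.2).filter
        (fun v => PySem.Set.contains (PySem.Set.ofList (pvLt it.2)) v)) ?_]
    · exact pv_flatMap_enum train
        (fun t => (pvLa t).filter (fun v => PySem.Set.contains (PySem.Set.ofList (pvLt t)) v))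
    · intro it hit
      rw [pv_trans_list train it.1 it.2]
      apply List.filter_congr
      intro v _
      exact pv_key_equiv train it.1 it.2 ((Prod.mk.eta (p := it)) ▸ hit) v
  rw [htrans]
  have hpred : (fun v => !((pvAgentDict train).contains v))
      = (fun v => !(PySem.Set.contains (PySem.Set.ofList (train.flatMap pvLa)) v)) := by
    funext v
    rw [PySem.Dict.contains_eq_decide_mem_keys, pv_agentDict_keys]
    congr 1
    rw [Bool.eq_iff_iff]
    simp
  rw [hpred, pv_agentDict_keys, pv_themeDict_keys, PySem.Set.ofList_ofList,
    PySem.Set.ofList_ofList]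
  rw [PySem.Set.ofList_eq_self_of_nodup _
    (List.Nodup.filter _ (PySem.Set.nodup_ofList (train.flatMap pvLt)))]
  rfl

-- ===== VERDICT (by name: the statement is the Claim_ definition above) =====
theorem classify_valency_spec : Claim_equal_classify_valency := by
  intro train _
  show classify_valency train = classify_valency_alt train
  rw [pvA_eq, pvB_eq]
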